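-- pv_equiv track=rewrite | github.com/WillJRoper/willjroper.github.io | generate_publications.py | format_journal
-- ===== SOURCE A (Python) =====
-- def format_journal(journal: str) -> str:
--     """Expand journal abbreviations."""
--     journal_map = {
--         '\\mnras': 'MNRAS',
--         '\\aap': 'A&A',
--         '\\apj': 'ApJ',
--     }
--
--     for abbr, full in journal_map.items():
--         journal = journal.replace(abbr, full)
--
--     return journal
-- ===== SOURCE B (Python) =====
-- def format_journal(journal: str) -> str:
--     """Expand journal abbreviations in a single left-to-right scan."""
--     pairs = (('\\mnras', 'MNRAS'), ('\\aap', 'A&A'), ('\\apj', 'ApJ'))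
--     out = []
--     i = 0
--     n = len(journal)
--     while i < n:
--         for abbr, full in pairs:
--             if journal.startswith(abbr, i):
--                 out.append(full)
--                 i += len(abbr)
--                 break
--         else:
--             out.append(journal[i])
--             i += 1
--     return ''.join(out)
-- ===== Notes on version B (the rewrite author's own statement) =====
-- stated objective: idiomatic
-- what changed: A makes three sequential str.replace passes over the string (one per abbreviation); B scans the string once left-to-right, trying the three abbreviations at each position and copying the character otherwise, which is exact because the keys cannot overlap and no expansion reintroduces a key.
import Mathlib
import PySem

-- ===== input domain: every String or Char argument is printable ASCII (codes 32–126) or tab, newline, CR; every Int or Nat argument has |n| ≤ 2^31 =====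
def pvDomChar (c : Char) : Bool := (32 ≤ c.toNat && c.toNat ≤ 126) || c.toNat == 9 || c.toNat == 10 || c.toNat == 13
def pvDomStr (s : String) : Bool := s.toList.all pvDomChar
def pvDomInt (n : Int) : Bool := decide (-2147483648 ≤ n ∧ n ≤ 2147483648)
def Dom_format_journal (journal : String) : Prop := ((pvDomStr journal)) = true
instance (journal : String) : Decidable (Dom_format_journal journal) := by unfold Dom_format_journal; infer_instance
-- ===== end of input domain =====

-- B replaces A's three sequential str.replace passes by one left-to-right scan that tries the
-- three abbreviations at each position (idiomatic single-pass substitution; exact equivalence).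

-- ===== PORT A =====
-- literal port of A: dict iterated in insertion order, journal reassigned by str.replace each pass
def format_journal (journal : String) : String :=
  let j1 := PySem.Str.replace journal "\\mnras" "MNRAS"
  let j2 := PySem.Str.replace j1 "\\aap" "A&A"
  PySem.Str.replace j2 "\\apj" "ApJ"

-- ===== PORT B =====
-- the while loop of Source B: the remaining suffix stands for the cursor i; the for/else over the
-- three concrete (abbr, full) pairs is unrolled to the three startswith tests in order
def fjScan : List Char → List Char
  | [] => []
  | c :: t =>
    if PySem.Chars.startswith (c :: t) ['\\','m','n','r','a','s'] then
      ['M','N','R','A','S'] ++ fjScan (t.drop 5)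
    else if PySem.Chars.startswith (c :: t) ['\\','a','a','p'] then
      ['A','&','A'] ++ fjScan (t.drop 3)
    else if PySem.Chars.startswith (c :: t) ['\\','a','p','j'] then
      ['A','p','J'] ++ fjScan (t.drop 3)
    else c :: fjScan t
termination_by l => l.length
decreasing_by all_goals (simp; try omega)

def format_journal_alt (journal : String) : String :=
  String.ofList (fjScan journal.toList)

-- ===== PRECONDITION & SPEC =====
def Spec_format_journal (journal : String) (out : String) : Prop := out = format_journal_alt journal
instance (journal : String) (out : String) : Decidable (Spec_format_journal journal out) := by unfold Spec_format_journal; infer_instance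

-- ===== CLAIM (what is proved, stated in full; the proofs are below) =====
def Claim_equal_format_journal : Prop := ∀ (journal : String), Dom_format_journal journal → Spec_format_journal journal (format_journal journal)

-- ===== LEMMAS AND PROOFS =====

-- fuel-free characterisation of PySem.Chars.replace for a nonempty pattern
def fjRep (old new : List Char) : List Char → List Char
  | [] => []
  | c :: t =>
    if List.isPrefixOf old (c :: t) then new ++ fjRep old new (t.drop (old.length - 1))
    else c :: fjRep old new t
termination_by l => l.length
decreasing_by all_goals (simp; try omega)

theorem fjGo_spec (old new : List Char) (hold : old ≠ []) :
    ∀ fuel (l acc : List Char), l.length ≤ fuel →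
      PySem.Chars.replace.go old new fuel l acc = acc.reverse ++ fjRep old new l := by
  intro fuel
  induction fuel with
  | zero =>
    intro l acc hl
    have : l = [] := List.eq_nil_of_length_eq_zero (Nat.le_zero.mp hl)
    subst this
    rw [PySem.Chars.replace.go.eq_def]
    simp [fjRep]
  | succ fuel ih =>
    intro l acc hl
    match l with
    | [] => rw [PySem.Chars.replace.go.eq_def]; simp [fjRep]
    | c :: t =>
      rw [PySem.Chars.replace.go.eq_def]
      simp only [fjRep]
      by_cases h : List.isPrefixOf old (c :: t)
      · rw [if_pos h, if_pos h]
        have hdrop : List.drop old.length (c :: t) = t.drop (old.length - 1) := by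
          match old, hold with
          | o :: os, _ => simp
        rw [hdrop, ih _ _ (by simp at hl ⊢; omega)]
        simp
      · rw [if_neg h, if_neg h, ih _ _ (by simp at hl ⊢; omega)]
        simp

theorem replace_eq_fjRep (s old new : List Char) (hold : old ≠ []) :
    PySem.Chars.replace s old new = fjRep old new s := by
  rw [PySem.Chars.replace]
  rw [if_neg (by simpa using hold)]
  simpa using fjGo_spec old new hold s.length s [] le_rfl

-- rewriting equations for fjRep
theorem fjRep_nil (old new : List Char) : fjRep old new [] = [] := by simp [fjRep]

theorem fjRep_cons_pos (old new : List Char) (c : Char) (t : List Char)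
    (h : old <+: c :: t) :
    fjRep old new (c :: t) = new ++ fjRep old new (t.drop (old.length - 1)) := by
  rw [fjRep, if_pos (by rwa [List.isPrefixOf_iff_prefix])]

theorem fjRep_cons_neg (old new : List Char) (c : Char) (t : List Char)
    (h : ¬ old <+: c :: t) :
    fjRep old new (c :: t) = c :: fjRep old new t := by
  rw [fjRep, if_neg (by rwa [List.isPrefixOf_iff_prefix])]

-- a block u without backslash passes unchanged through fjRep for a pattern starting with '\\'
theorem fjRep_append_nb (o' new : List Char) (u : List Char) (hu : '\\' ∉ u) (v : List Char) :
    fjRep ('\\' :: o') new (u ++ v) = u ++ fjRep ('\\' :: o') new v := by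
  induction u with
  | nil => simp
  | cons a u ih =>
    have ha : a ≠ '\\' := by intro h; exact hu (h ▸ List.mem_cons_self ..)
    rw [List.cons_append, fjRep_cons_neg _ _ _ _ (by
      intro h
      exact ha ((List.cons_prefix_cons.mp h).1.symm)), ih (fun h => hu (List.mem_cons_of_mem _ h))]
    simp

-- a pattern p avoiding the replacement's first char is a prefix of fjRep … t only if it was one of t
theorem fjPrefix_through (old : List Char) (n0 : Char) (ns : List Char) :
    ∀ (p t : List Char), (∀ c ∈ p, c ≠ n0) → p <+: fjRep old (n0 :: ns) t → p <+: t := by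
  intro p
  induction p with
  | nil => intro t _ _; exact List.nil_prefix
  | cons a p ih =>
    intro t hp hpre
    match t with
    | [] => rw [fjRep_nil] at hpre; exact absurd (List.prefix_nil.mp hpre) (by simp)
    | c :: t =>
      by_cases h : old <+: c :: t
      · rw [fjRep_cons_pos _ _ _ _ h, List.cons_append] at hpre
        exact absurd (List.cons_prefix_cons.mp hpre).1 (hp a (List.mem_cons_self ..))
      · rw [fjRep_cons_neg _ _ _ _ h] at hpre
        obtain ⟨hac, hpre'⟩ := List.cons_prefix_cons.mp hpre
        subst hac
        exact List.cons_prefix_cons.mpr ⟨rfl, ih t (fun c hc => hp c (List.mem_cons_of_mem _ hc)) hpre'⟩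


-- keys start with '\\': a cons with another head passes through
theorem fjRepK_cons_ne (o' new : List Char) (c : Char) (t : List Char) (hc : c ≠ '\\') :
    fjRep ('\\' :: o') new (c :: t) = c :: fjRep ('\\' :: o') new t :=
  fjRep_cons_neg _ _ _ _ (fun h => hc (List.cons_prefix_cons.mp h).1.symm)

-- concrete-key computation lemmas
theorem fjRep1_match (t : List Char) :
    fjRep ['\\','m','n','r','a','s'] ['M','N','R','A','S'] ('\\'::'m'::'n'::'r'::'a'::'s'::t)
      = ['M','N','R','A','S'] ++ fjRep ['\\','m','n','r','a','s'] ['M','N','R','A','S'] t := by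
  rw [fjRep_cons_pos _ _ _ _ (by exact List.prefix_append _ t)]; rfl

theorem fjRep2_match (new : List Char) (t : List Char) :
    fjRep ['\\','a','a','p'] new ('\\'::'a'::'a'::'p'::t)
      = new ++ fjRep ['\\','a','a','p'] new t := by
  rw [fjRep_cons_pos _ _ _ _ (by exact List.prefix_append _ t)]; rfl

theorem fjRep3_match (t : List Char) :
    fjRep ['\\','a','p','j'] ['A','p','J'] ('\\'::'a'::'p'::'j'::t)
      = ['A','p','J'] ++ fjRep ['\\','a','p','j'] ['A','p','J'] t := by
  rw [fjRep_cons_pos _ _ _ _ (by exact List.prefix_append _ t)]; rfl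

theorem fjRep1_aap (t : List Char) :
    fjRep ['\\','m','n','r','a','s'] ['M','N','R','A','S'] ('\\'::'a'::'a'::'p'::t)
      = '\\'::'a'::'a'::'p':: fjRep ['\\','m','n','r','a','s'] ['M','N','R','A','S'] t := by
  rw [fjRep_cons_neg _ _ _ _ (by intro h; simp [List.cons_prefix_cons] at h),
      fjRepK_cons_ne _ _ _ _ (by decide), fjRepK_cons_ne _ _ _ _ (by decide),
      fjRepK_cons_ne _ _ _ _ (by decide)]

theorem fjRep1_apj (t : List Char) :
    fjRep ['\\','m','n','r','a','s'] ['M','N','R','A','S'] ('\\'::'a'::'p'::'j'::t)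
      = '\\'::'a'::'p'::'j':: fjRep ['\\','m','n','r','a','s'] ['M','N','R','A','S'] t := by
  rw [fjRep_cons_neg _ _ _ _ (by intro h; simp [List.cons_prefix_cons] at h),
      fjRepK_cons_ne _ _ _ _ (by decide), fjRepK_cons_ne _ _ _ _ (by decide),
      fjRepK_cons_ne _ _ _ _ (by decide)]

theorem fjRep2_apj (t : List Char) :
    fjRep ['\\','a','a','p'] ['A','&','A'] ('\\'::'a'::'p'::'j'::t)
      = '\\'::'a'::'p'::'j':: fjRep ['\\','a','a','p'] ['A','&','A'] t := by
  rw [fjRep_cons_neg _ _ _ _ (by intro h; simp [List.cons_prefix_cons] at h),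
      fjRepK_cons_ne _ _ _ _ (by decide), fjRepK_cons_ne _ _ _ _ (by decide),
      fjRepK_cons_ne _ _ _ _ (by decide)]

-- fjScan equations
theorem fjScan_eq1 (t : List Char) :
    fjScan ('\\'::'m'::'n'::'r'::'a'::'s'::t) = ['M','N','R','A','S'] ++ fjScan t := by
  rw [fjScan]
  rw [if_pos (by rw [PySem.Chars.startswith_iff]; exact List.prefix_append _ t)]
  rfl

theorem fjScan_eq2 (t : List Char) :
    fjScan ('\\'::'a'::'a'::'p'::t) = ['A','&','A'] ++ fjScan t := by
  rw [fjScan]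
  rw [if_neg (by simp only [PySem.Chars.startswith_iff]; intro h; simp [List.cons_prefix_cons] at h),
      if_pos (by rw [PySem.Chars.startswith_iff]; exact List.prefix_append _ t)]
  rfl

theorem fjScan_eq3 (t : List Char) :
    fjScan ('\\'::'a'::'p'::'j'::t) = ['A','p','J'] ++ fjScan t := by
  rw [fjScan]
  rw [if_neg (by simp only [PySem.Chars.startswith_iff]; intro h; simp [List.cons_prefix_cons] at h),
      if_neg (by simp only [PySem.Chars.startswith_iff]; intro h; simp [List.cons_prefix_cons] at h),
      if_pos (by rw [PySem.Chars.startswith_iff]; exact List.prefix_append _ t)]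
  rfl

theorem fjScan_ne (c : Char) (t : List Char)
    (h1 : ¬ ['\\','m','n','r','a','s'] <+: c :: t)
    (h2 : ¬ ['\\','a','a','p'] <+: c :: t)
    (h3 : ¬ ['\\','a','p','j'] <+: c :: t) :
    fjScan (c :: t) = c :: fjScan t := by
  rw [fjScan]
  rw [if_neg (by simpa only [PySem.Chars.startswith_iff] using h1),
      if_neg (by simpa only [PySem.Chars.startswith_iff] using h2),
      if_neg (by simpa only [PySem.Chars.startswith_iff] using h3)]

-- the three concrete keys / values
set_option maxRecDepth 4096 in
theorem fjMain : ∀ (l : List Char),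
    fjRep ['\\','a','p','j'] ['A','p','J']
      (fjRep ['\\','a','a','p'] ['A','&','A']
        (fjRep ['\\','m','n','r','a','s'] ['M','N','R','A','S'] l)) = fjScan l := by
  have key : ∀ n (l : List Char), l.length ≤ n →
      fjRep ['\\','a','p','j'] ['A','p','J']
        (fjRep ['\\','a','a','p'] ['A','&','A']
          (fjRep ['\\','m','n','r','a','s'] ['M','N','R','A','S'] l)) = fjScan l := by
    intro n
    induction n with
    | zero =>
      intro l hl
      have : l = [] := List.eq_nil_of_length_eq_zero (Nat.le_zero.mp hl)
      subst this; simp [fjRep_nil, fjScan]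
    | succ n ih =>
      intro l hl
      match l with
      | [] => simp [fjRep_nil, fjScan]
      | c :: t =>
        by_cases h1 : ['\\','m','n','r','a','s'] <+: c :: t
        · obtain ⟨t', ht⟩ := h1
          rw [← ht]
          rw [show ['\\','m','n','r','a','s'] ++ t' = '\\'::'m'::'n'::'r'::'a'::'s'::t' from rfl]
          rw [fjRep1_match, fjRep_append_nb _ _ _ (by decide), fjRep_append_nb _ _ _ (by decide),
              fjScan_eq1, ih t' (by
                have := congrArg List.length ht
                simp at this hl ⊢
                omega)]
        · by_cases h2 : ['\\','a','a','p'] <+: c :: t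
          · obtain ⟨t', ht⟩ := h2
            rw [← ht]
            rw [show ['\\','a','a','p'] ++ t' = '\\'::'a'::'a'::'p'::t' from rfl]
            rw [fjRep1_aap, fjRep2_match, fjRep_append_nb _ _ _ (by decide),
                fjScan_eq2, ih t' (by
                  have := congrArg List.length ht
                  simp at this hl ⊢
                  omega)]
          · by_cases h3 : ['\\','a','p','j'] <+: c :: t
            · obtain ⟨t', ht⟩ := h3
              rw [← ht]
              rw [show ['\\','a','p','j'] ++ t' = '\\'::'a'::'p'::'j'::t' from rfl]
              rw [fjRep1_apj, fjRep2_apj, fjRep3_match,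
                  fjScan_eq3, ih t' (by
                    have := congrArg List.length ht
                    simp at this hl ⊢
                    omega)]
            · -- no key matches at this position
              have hstep := ih t (by simp at hl ⊢; omega)
              by_cases hc : c = '\\'
              · subst hc
                have e1 : fjRep ['\\','m','n','r','a','s'] ['M','N','R','A','S'] ('\\' :: t)
                    = '\\' :: fjRep ['\\','m','n','r','a','s'] ['M','N','R','A','S'] t :=
                  fjRep_cons_neg _ _ _ _ h1
                rw [e1]
                rw [fjRep_cons_neg ['\\','a','a','p'] _ _ _ (by
                  intro h
                  obtain ⟨-, hp⟩ := List.cons_prefix_cons.mp h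
                  have := fjPrefix_through ['\\','m','n','r','a','s'] 'M' ['N','R','A','S']
                    ['a','a','p'] t (by simp) hp
                  exact h2 (List.cons_prefix_cons.mpr ⟨rfl, this⟩))]
                rw [fjRep_cons_neg ['\\','a','p','j'] _ _ _ (by
                  intro h
                  obtain ⟨-, hp⟩ := List.cons_prefix_cons.mp h
                  have hp2 := fjPrefix_through ['\\','a','a','p'] 'A' ['&','A']
                    ['a','p','j'] _ (by simp) hp
                  have hp3 := fjPrefix_through ['\\','m','n','r','a','s'] 'M' ['N','R','A','S']
                    ['a','p','j'] t (by simp) hp2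
                  exact h3 (List.cons_prefix_cons.mpr ⟨rfl, hp3⟩))]
                rw [fjScan_ne _ _ h1 h2 h3, hstep]
              · rw [fjRepK_cons_ne _ _ _ _ hc, fjRepK_cons_ne _ _ _ _ hc,
                    fjRepK_cons_ne _ _ _ _ hc, fjScan_ne _ _ h1 h2 h3, hstep]
  intro l; exact key l.length l le_rfl

theorem fjEquiv (s : String) : format_journal s = format_journal_alt s := by
  rw [format_journal, format_journal_alt]
  simp only [PySem.Str.replace, String.toList_ofList]
  rw [show ("\\mnras" : String).toList = ['\\','m','n','r','a','s'] from rfl,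
      show ("MNRAS" : String).toList = ['M','N','R','A','S'] from rfl,
      show ("\\aap" : String).toList = ['\\','a','a','p'] from rfl,
      show ("A&A" : String).toList = ['A','&','A'] from rfl,
      show ("\\apj" : String).toList = ['\\','a','p','j'] from rfl,
      show ("ApJ" : String).toList = ['A','p','J'] from rfl,
      replace_eq_fjRep s.toList ['\\','m','n','r','a','s'] ['M','N','R','A','S'] (by decide),
      replace_eq_fjRep _ ['\\','a','a','p'] ['A','&','A'] (by decide),
      replace_eq_fjRep _ ['\\','a','p','j'] ['A','p','J'] (by decide)]
  congr 1
  exact fjMain s.toList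

-- ===== VERDICT (by name: the statement is the Claim_ definition above) =====
theorem format_journal_spec : Claim_equal_format_journal := by
  intro journal _
  unfold Spec_format_journal
  exact fjEquiv journal
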